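-- pv_equiv track=rewrite | github.com/gavinjackson/bsides--ctf | exact_solution_finder.py | check_sudoku_constraints
-- ===== SOURCE A (Python) =====
-- def check_sudoku_constraints(grid):
--     """Check sudoku constraints for 9x9 region"""
--     rows_valid = True
--     cols_valid = True
--     boxes_valid = True
--
--     # Check rows 5-13
--     for r in range(5, 14):
--         if r < len(grid):
--             row_letters = [grid[r][c] for c in range(9) if grid[r][c] and grid[r][c] != '']
--             if len(set(row_letters)) != len(row_letters):
--                 rows_valid = False
--
--     # Check columns 0-8
--     for c in range(9):
--         col_letters = [grid[r][c] for r in range(5, 14)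
--                       if r < len(grid) and grid[r][c] and grid[r][c] != '']
--         if len(set(col_letters)) != len(col_letters):
--             cols_valid = False
--
--     # Check 3x3 boxes
--     for box_r in range(3):
--         for box_c in range(3):
--             box_letters = []
--             for r in range(box_r * 3 + 5, box_r * 3 + 8):
--                 for c in range(box_c * 3, box_c * 3 + 3):
--                     if r < len(grid) and grid[r][c] and grid[r][c] != '':
--                         box_letters.append(grid[r][c])
--             if len(set(box_letters)) != len(box_letters):
--                 boxes_valid = False
--
--     return rows_valid, cols_valid, boxes_valid
-- ===== SOURCE B (Python) =====
-- def check_sudoku_constraints(grid):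
--     """One-pass validator: tag each value with its row/column/box group and
--     flag a group as invalid the moment a tagged value repeats."""
--     rows_ok = True
--     cols_ok = True
--     boxes_ok = True
--     seen = set()
--     for r in range(5, 14):
--         if r < len(grid):
--             for c in range(9):
--                 v = grid[r][c]
--                 if v and v != '':
--                     rk = ('row', r, v)
--                     ck = ('col', c, v)
--                     bk = ('box', 3 * ((r - 5) // 3) + c // 3, v)
--                     if rk in seen:
--                         rows_ok = False
--                     if ck in seen:
--                         cols_ok = False
--                     if bk in seen:
--                         boxes_ok = False
--                     seen.add(rk)
--                     seen.add(ck)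
--                     seen.add(bk)
--     return rows_ok, cols_ok, boxes_ok
-- ===== Notes on version B (the rewrite author's own statement) =====
-- stated objective: alternative
-- what changed: A makes three separate staged scans (per row, per column, per 3x3 box), materialises each group and compares len(set(group)) with len(group); B is the classic one-pass validator: it reads each cell once, tags its value with ('row',r), ('col',c) and ('box',idx) keys in a single shared seen-set, and flags the corresponding group invalid the moment a tagged key repeats - no group lists and no set-size comparison at all.
import Mathlib
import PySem

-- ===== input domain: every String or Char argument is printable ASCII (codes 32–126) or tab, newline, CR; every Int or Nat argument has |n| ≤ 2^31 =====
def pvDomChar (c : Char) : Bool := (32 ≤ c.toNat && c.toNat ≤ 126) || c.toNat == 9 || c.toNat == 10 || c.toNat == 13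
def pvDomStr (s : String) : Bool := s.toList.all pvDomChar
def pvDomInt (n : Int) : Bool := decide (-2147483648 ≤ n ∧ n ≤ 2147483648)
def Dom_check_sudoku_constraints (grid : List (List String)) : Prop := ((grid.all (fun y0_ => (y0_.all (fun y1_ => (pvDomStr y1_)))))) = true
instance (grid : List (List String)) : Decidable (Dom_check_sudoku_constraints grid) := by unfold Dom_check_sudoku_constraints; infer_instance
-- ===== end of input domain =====

-- B replaces A's three staged scans (group lists + set-size comparison per row/column/box) by the
-- classic one-pass validator: each cell is read once and its value tagged with ('row',r)/('col',c)/('box',idx)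
-- keys in one shared seen-set; a group is flagged invalid the moment a tagged key repeats (objective: alternative).

-- ===== PORT A =====
-- grid[r][c]; exact wherever Pre_check_sudoku_constraints holds (Python raises IndexError exactly where the defaults would be read)
def pvCell (grid : List (List String)) (r c : Int) : String :=
  PySem.List.pyGetD (PySem.List.pyGetD grid r []) c ""

-- Python's cell test `grid[r][c] and grid[r][c] != ''` is two copies of the same non-empty-string test
def check_sudoku_constraints (grid : List (List String)) : Bool × Bool × Bool :=
  let n : Int := (grid.length : Int)
  let rows_valid := (PySem.List.pyRange 5 14 1).foldl (fun acc r =>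
    if r < n then
      let row_letters := (PySem.List.pyRange 0 9 1).foldl (fun a c =>
        if pvCell grid r c ≠ "" then a ++ [pvCell grid r c] else a) []
      if (PySem.Set.ofList row_letters).length ≠ row_letters.length then false else acc
    else acc) true
  let cols_valid := (PySem.List.pyRange 0 9 1).foldl (fun acc c =>
    let col_letters := (PySem.List.pyRange 5 14 1).foldl (fun a r =>
      if r < n ∧ pvCell grid r c ≠ "" then a ++ [pvCell grid r c] else a) []
    if (PySem.Set.ofList col_letters).length ≠ col_letters.length then false else acc) true
  let boxes_valid := (PySem.List.pyRange 0 3 1).foldl (fun acc box_r =>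
    (PySem.List.pyRange 0 3 1).foldl (fun acc2 box_c =>
      let box_letters := (PySem.List.pyRange (box_r*3+5) (box_r*3+8) 1).foldl (fun a r =>
        (PySem.List.pyRange (box_c*3) (box_c*3+3) 1).foldl (fun a2 c =>
          if r < n ∧ pvCell grid r c ≠ "" then a2 ++ [pvCell grid r c] else a2) a) []
      if (PySem.Set.ofList box_letters).length ≠ box_letters.length then false else acc2) acc) true
  (rows_valid, cols_valid, boxes_valid)

-- ===== PORT B =====
-- the three tagged keys ('row', r, v), ('col', c, v), ('box', 3*((r-5)//3)+c//3, v) of a cell (r, c, v)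
def pvTagR (t : Int × Int × String) : String × Int × String := ("row", t.1, t.2.2)
def pvTagC (t : Int × Int × String) : String × Int × String := ("col", t.2.1, t.2.2)
def pvTagB (t : Int × Int × String) : String × Int × String :=
  ("box", 3 * PySem.Int.floordiv (t.1 - 5) 3 + PySem.Int.floordiv t.2.1 3, t.2.2)

-- state: (rows_ok, cols_ok, boxes_ok, seen); the loop body of Source B for one non-empty cell:
-- three membership checks against `seen` then the three adds
def pvStep (st : Bool × Bool × Bool × PySem.Set (String × Int × String))
    (t : Int × Int × String) : Bool × Bool × Bool × PySem.Set (String × Int × String) :=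
  (if PySem.Set.contains st.2.2.2 (pvTagR t) then false else st.1,
   if PySem.Set.contains st.2.2.2 (pvTagC t) then false else st.2.1,
   if PySem.Set.contains st.2.2.2 (pvTagB t) then false else st.2.2.1,
   PySem.Set.add (PySem.Set.add (PySem.Set.add st.2.2.2 (pvTagR t)) (pvTagC t)) (pvTagB t))

def check_sudoku_constraints_alt (grid : List (List String)) : Bool × Bool × Bool :=
  let n : Int := (grid.length : Int)
  let st := (PySem.List.pyRange 5 14 1).foldl (fun st r =>
    if r < n then
      (PySem.List.pyRange 0 9 1).foldl (fun st c =>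
        let v := pvCell grid r c
        if v ≠ "" then pvStep st (r, c, v) else st) st
    else st) (true, true, true, PySem.Set.empty)
  (st.1, st.2.1, st.2.2.1)

-- ===== PRECONDITION & SPEC =====
-- Pre_ excludes exactly the grids where Python raises IndexError: a row among rows 5..13 with fewer than 9 entries.
def Pre_check_sudoku_constraints (grid : List (List String)) : Prop :=
  ∀ row ∈ (grid.drop 5).take 9, 9 ≤ row.length
instance (grid : List (List String)) : Decidable (Pre_check_sudoku_constraints grid) := by
  unfold Pre_check_sudoku_constraints; infer_instance

def pvWitness_check_sudoku_constraints : List (List String) :=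
  [[], [], [], [], [], ["a","b","c","d","e","f","g","h","a"]]

def Spec_check_sudoku_constraints (grid : List (List String)) (out : Bool × Bool × Bool) : Prop := out = check_sudoku_constraints_alt grid
instance (grid : List (List String)) (out : Bool × Bool × Bool) : Decidable (Spec_check_sudoku_constraints grid out) := by unfold Spec_check_sudoku_constraints; infer_instance

-- ===== CLAIM (what is proved, stated in full; the proofs are below) =====
def Claim_equal_check_sudoku_constraints : Prop := ∀ (grid : List (List String)), Dom_check_sudoku_constraints grid → Pre_check_sudoku_constraints grid → Spec_check_sudoku_constraints grid (check_sudoku_constraints grid)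

-- ===== LEMMAS AND PROOFS =====

-- ---------- the staged per-group middle form (proof-only): both ports are shown equal to pvMid ----------
def pvChunk (grid : List (List String)) (r : Int) : List (Int × Int × String) :=
  if r < (grid.length : Int) then
    ((PySem.List.pyRange 0 9 1).filter (fun c => decide (pvCell grid r c ≠ ""))).map
      (fun c => (r, c, pvCell grid r c))
  else []

def pvCells (grid : List (List String)) : List (Int × Int × String) :=
  (PySem.List.pyRange 5 14 1).flatMap (pvChunk grid)

def pvNoDup (g : List String) : Bool := (PySem.Set.ofList g).length == g.length

def pvGroup (grid : List (List String)) (p : (Int × Int × String) → Bool) : List String :=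
  ((pvCells grid).filter p).map (fun t => t.2.2)

def pvMid (grid : List (List String)) : Bool × Bool × Bool :=
  ((PySem.List.pyRange 5 14 1).all (fun r => pvNoDup (pvGroup grid (fun t => t.1 == r))),
   (PySem.List.pyRange 0 9 1).all (fun c => pvNoDup (pvGroup grid (fun t => t.2.1 == c))),
   (PySem.List.pyRange 0 3 1).all (fun br => (PySem.List.pyRange 0 3 1).all (fun bc =>
     pvNoDup (pvGroup grid (fun t =>
       PySem.Int.floordiv (t.1 - 5) 3 == br && PySem.Int.floordiv t.2.1 3 == bc)))))

-- ---------- generic loop-shape lemmas used on A's side ----------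
lemma pv_all_congr_mem {α : Type} {l : List α} {p q : α → Bool} (h : ∀ a ∈ l, p a = q a) :
    l.all p = l.all q := by
  induction l with
  | nil => rfl
  | cons x xs ih =>
    simp only [List.all_cons, h x (by simp), ih (fun a ha => h a (by simp [ha]))]

lemma pv_foldl_latch (P : Int → Prop) [DecidablePred P] :
    ∀ (l : List Int) (acc : Bool),
    l.foldl (fun a x => if P x then false else a) acc = (acc && l.all (fun x => !decide (P x))) := by
  intro l
  induction l with
  | nil => simp
  | cons x xs ih =>
    intro acc
    by_cases h : P x
    · simp only [List.foldl_cons, if_pos h, ih, List.all_cons]; simp [h]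
    · simp only [List.foldl_cons, if_neg h, ih, List.all_cons]; simp [h]

lemma pv_foldl_and (f : Int → Bool) :
    ∀ (l : List Int) (acc : Bool),
    l.foldl (fun a x => a && f x) acc = (acc && l.all f) := by
  intro l
  induction l with
  | nil => simp
  | cons x xs ih => intro acc; simp [ih, Bool.and_assoc]

lemma pv_foldl_append {β : Type} (P : Int → Prop) [DecidablePred P] (f : Int → β) :
    ∀ (cs : List Int) (acc : List β),
    cs.foldl (fun a c => if P c then a ++ [f c] else a) acc
      = acc ++ (cs.filter (fun c => decide (P c))).map f := by
  intro cs
  induction cs with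
  | nil => simp
  | cons c cs ih => intro acc; by_cases h : P c <;> simp [h, ih]

lemma pv_foldl_guard {β : Type} (P : Int → Prop) [DecidablePred P] (F : Int → List β) :
    ∀ (rs : List Int) (acc : List β),
    rs.foldl (fun a r => if P r then a ++ F r else a) acc
      = acc ++ rs.flatMap (fun r => if P r then F r else []) := by
  intro rs
  induction rs with
  | nil => simp
  | cons r rs ih => intro acc; by_cases h : P r <;> simp [h, ih]

lemma pv_foldl_chunks {β : Type} (F : Int → List β) :
    ∀ (rs : List Int) (acc : List β),
    rs.foldl (fun a r => a ++ F r) acc = acc ++ rs.flatMap F := by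
  intro rs
  induction rs with
  | nil => simp
  | cons r rs ih => intro acc; simp [ih]

lemma pv_flatMap_if {β : Type} (P : Int → Prop) [DecidablePred P] (h : Int → β) (l : List Int) :
    l.flatMap (fun r => if P r then [h r] else []) = (l.filter (fun r => decide (P r))).map h := by
  induction l with
  | nil => rfl
  | cons r rs ih => by_cases hp : P r <;> simp [hp, ih]

lemma pv_filter_and_swap (a b : Int → Bool) (l : List Int) :
    l.filter (fun c => a c && b c) = (l.filter a).filter b := by
  induction l with
  | nil => rfl
  | cons c cs ih => cases ha : a c <;> cases hb : b c <;> simp [ha, hb, ih]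

lemma pv_cells_eq (grid : List (List String)) :
    (PySem.List.pyRange 5 14 1).foldl (fun acc r =>
      if r < (grid.length : Int) then
        (PySem.List.pyRange 0 9 1).foldl (fun acc2 c =>
          if pvCell grid r c ≠ "" then acc2 ++ [(r, c, pvCell grid r c)] else acc2) acc
      else acc) []
    = pvCells grid := by
  simp only [pv_foldl_append (fun c => pvCell grid _ c ≠ "") (fun c => (_, c, pvCell grid _ c))]
  rw [pv_foldl_guard]
  simp only [pvCells, List.nil_append]
  congr 1

lemma pv_chunk_filter_fst (grid : List (List String)) (r r0 : Int) :
    (pvChunk grid r).filter (fun t => t.1 == r0) = if r = r0 then pvChunk grid r else [] := by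
  unfold pvChunk
  by_cases hr : r = r0 <;> by_cases hn : r < (grid.length : Int) <;>
    simp [hr, hn, List.filter_map, Function.comp] <;> (intros; omega)

lemma pv_filter_eqc (p : Int → Bool) (c0 : Int) (hc : c0 ∈ ([0,1,2,3,4,5,6,7,8] : List Int)) :
    ([0,1,2,3,4,5,6,7,8] : List Int).filter (fun c => (c == c0) && p c)
      = if p c0 then [c0] else [] := by
  fin_cases hc <;> · simp only [List.filter_cons, List.filter_nil]; simp

lemma pv_chunk_box_off (grid : List (List String)) (br bc r : Int)
    (h : (PySem.Int.floordiv (r - 5) 3 == br) = false) :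
    List.map (fun t => t.2.2) ((pvChunk grid r).filter
      (fun t => PySem.Int.floordiv (t.1 - 5) 3 == br && PySem.Int.floordiv t.2.1 3 == bc)) = [] := by
  unfold pvChunk
  by_cases hn : r < (grid.length:Int)
  · simp only [if_pos hn, List.filter_map]
    rw [List.filter_filter]
    simp only [Function.comp_apply]
    have h' : ¬ ((r - 5) / 3 = br) := by
      rw [PySem.Int.floordiv_eq_ediv_of_pos (by norm_num)] at h
      simpa using h
    simp [h']
  · simp [hn]

lemma pv_chunk_box_on (grid : List (List String)) (br bc r : Int)
    (h : (PySem.Int.floordiv (r - 5) 3 == br) = true) :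
    List.map (fun t => t.2.2) ((pvChunk grid r).filter
      (fun t => PySem.Int.floordiv (t.1 - 5) 3 == br && PySem.Int.floordiv t.2.1 3 == bc))
    = if r < (grid.length:Int) then
        List.map (fun c => pvCell grid r c)
          (((PySem.List.pyRange 0 9 1).filter (fun c => PySem.Int.floordiv c 3 == bc)).filter
            (fun c => decide (pvCell grid r c ≠ "")))
      else [] := by
  unfold pvChunk
  by_cases hn : r < (grid.length:Int)
  · simp only [if_pos hn, List.filter_map]
    rw [List.filter_filter]
    simp only [Function.comp_apply, h, Bool.true_and]
    rw [pv_filter_and_swap]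
    simp [List.map_map, Function.comp]
  · simp [hn]

lemma pv_boxrowA (grid : List (List String)) (r : Int) (cols : List Int) :
    List.map (fun c => pvCell grid r c)
        (cols.filter (fun c => decide (r < (grid.length:Int) ∧ pvCell grid r c ≠ "")))
      = if r < (grid.length:Int) then
          List.map (fun c => pvCell grid r c) (cols.filter (fun c => decide (pvCell grid r c ≠ "")))
        else [] := by
  by_cases hn : r < (grid.length:Int) <;> simp [hn]

lemma pv_neq (a b : Nat) : (!decide (a ≠ b)) = (a == b) := by
  by_cases h : a = b <;> simp [h]

lemma pv_row_finish (grid : List (List String)) (k : Nat) :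
    (!decide (k < grid.length) || decide (
        (PySem.Set.ofList ((List.filter (fun c => !decide (pvCell grid (k:Int) c = "")) (PySem.List.pyRange 0 9 1)).map (fun c => pvCell grid (k:Int) c))).length
          = (List.filter (fun c => !decide (pvCell grid (k:Int) c = "")) (PySem.List.pyRange 0 9 1)).length))
      = ((PySem.Set.ofList ((pvChunk grid (k:Int)).map (fun t => t.2.2))).length == (pvChunk grid (k:Int)).length) := by
  unfold pvChunk
  by_cases hg : k < grid.length
  · have hgi : ((k:Int) < (grid.length : Int)) := by exact_mod_cast hg
    simp only [hg, hgi, if_pos, decide_true, Bool.not_true, Bool.false_or, List.map_map]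
    have hcomp : ((fun (t : Int × Int × String) => t.2.2) ∘ (fun c => ((k:Int), c, pvCell grid (k:Int) c))) = (fun c => pvCell grid (k:Int) c) := by
      funext c; rfl
    rw [hcomp]
    by_cases hd : (PySem.Set.ofList ((List.filter (fun c => !decide (pvCell grid (k:Int) c = "")) (PySem.List.pyRange 0 9 1)).map (fun c => pvCell grid (k:Int) c))).length = (List.filter (fun c => !decide (pvCell grid (k:Int) c = "")) (PySem.List.pyRange 0 9 1)).length
    · simp only [List.length_map] at hd ⊢
      simp [hd]
    · simp only [List.length_map] at hd ⊢
      simp [hd]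
  · have hgi : ¬ ((k:Int) < (grid.length : Int)) := by exact_mod_cast hg
    simp [hg, hgi]

lemma pv_chunk_col (grid : List (List String)) (c0 : Int)
    (hc0 : c0 ∈ ([0,1,2,3,4,5,6,7,8] : List Int)) (r : Int) :
    List.map (fun t => t.2.2) ((pvChunk grid r).filter (fun t => t.2.1 == c0))
      = if r < (grid.length:Int) ∧ pvCell grid r c0 ≠ "" then [pvCell grid r c0] else [] := by
  unfold pvChunk
  rw [show PySem.List.pyRange 0 9 1 = [0,1,2,3,4,5,6,7,8] from by decide]
  by_cases hn : r < (grid.length:Int)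
  · simp only [if_pos hn, List.filter_map]
    rw [List.filter_filter]
    simp only [Function.comp_apply]
    rw [pv_filter_eqc _ c0 hc0]
    by_cases hp : pvCell grid r c0 ≠ "" <;> simp [hn, hp]
  · simp [hn]

-- ---------- A = pvMid ----------
lemma pv_A_eq_mid (grid : List (List String)) : check_sudoku_constraints grid = pvMid grid := by
  simp only [check_sudoku_constraints, pvMid, pvGroup, pvNoDup]
  rw [← pv_cells_eq]
  rw [pv_cells_eq]
  simp only [Prod.mk.injEq]
  refine ⟨?_, ?_, ?_⟩
  · -- rows
    simp only [pv_foldl_append (fun c => pvCell grid _ c ≠ "") (fun c => pvCell grid _ c)]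
    simp only [← ite_and]
    rw [pv_foldl_latch]
    simp only [Bool.true_and]
    refine pv_all_congr_mem ?_
    intro r0 hr0
    simp only [pvCells, List.filter_flatMap, pv_chunk_filter_fst]
    rw [show PySem.List.pyRange 5 14 1 = [5,6,7,8,9,10,11,12,13] from by decide] at hr0
    simp only [show PySem.List.pyRange 5 14 1 = [5,6,7,8,9,10,11,12,13] from by decide]
    fin_cases hr0 <;>
    · simp only [List.flatMap_cons, List.flatMap_nil, List.nil_append, List.append_nil]
      norm_num
      exact pv_row_finish grid _
  · -- cols
    simp only [pv_foldl_append (fun r => r < (grid.length:Int) ∧ pvCell grid r _ ≠ "") (fun r => pvCell grid r _)]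
    rw [pv_foldl_latch]
    simp only [Bool.true_and]
    refine pv_all_congr_mem ?_
    intro c0 hc0
    rw [show PySem.List.pyRange 0 9 1 = [0,1,2,3,4,5,6,7,8] from by decide] at hc0
    simp only [pvCells, List.filter_flatMap, List.map_flatMap]
    simp only [pv_chunk_col grid c0 hc0]
    rw [pv_flatMap_if]
    simp only [List.nil_append]
    exact pv_neq _ _
  · -- boxes
    simp only [pv_foldl_append]
    simp only [pv_foldl_chunks]
    simp only [pv_foldl_latch]
    simp only [pv_foldl_and]
    simp only [Bool.true_and]
    refine pv_all_congr_mem ?_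
    intro br0 hbr0
    refine pv_all_congr_mem ?_
    intro bc0 hbc0
    rw [show PySem.List.pyRange 0 3 1 = [0,1,2] from by decide] at hbr0 hbc0
    simp only [pvCells, List.filter_flatMap, List.map_flatMap]
    fin_cases hbr0 <;> fin_cases hbc0 <;>
    · simp only [show PySem.List.pyRange 5 14 1 = [5,6,7,8,9,10,11,12,13] from by decide,
            List.flatMap_cons, List.flatMap_nil]
      norm_num only
      simp only [
            show (PySem.Int.floordiv (5 - 5) 3 == (0:Int)) = true from by decide,
            show (PySem.Int.floordiv (5 - 5) 3 == (1:Int)) = false from by decide,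
            show (PySem.Int.floordiv (5 - 5) 3 == (2:Int)) = false from by decide,
            show (PySem.Int.floordiv (6 - 5) 3 == (0:Int)) = true from by decide,
            show (PySem.Int.floordiv (6 - 5) 3 == (1:Int)) = false from by decide,
            show (PySem.Int.floordiv (6 - 5) 3 == (2:Int)) = false from by decide,
            show (PySem.Int.floordiv (7 - 5) 3 == (0:Int)) = true from by decide,
            show (PySem.Int.floordiv (7 - 5) 3 == (1:Int)) = false from by decide,
            show (PySem.Int.floordiv (7 - 5) 3 == (2:Int)) = false from by decide,
            show (PySem.Int.floordiv (8 - 5) 3 == (0:Int)) = false from by decide,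
            show (PySem.Int.floordiv (8 - 5) 3 == (1:Int)) = true from by decide,
            show (PySem.Int.floordiv (8 - 5) 3 == (2:Int)) = false from by decide,
            show (PySem.Int.floordiv (9 - 5) 3 == (0:Int)) = false from by decide,
            show (PySem.Int.floordiv (9 - 5) 3 == (1:Int)) = true from by decide,
            show (PySem.Int.floordiv (9 - 5) 3 == (2:Int)) = false from by decide,
            show (PySem.Int.floordiv (10 - 5) 3 == (0:Int)) = false from by decide,
            show (PySem.Int.floordiv (10 - 5) 3 == (1:Int)) = true from by decide,
            show (PySem.Int.floordiv (10 - 5) 3 == (2:Int)) = false from by decide,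
            show (PySem.Int.floordiv (11 - 5) 3 == (0:Int)) = false from by decide,
            show (PySem.Int.floordiv (11 - 5) 3 == (1:Int)) = false from by decide,
            show (PySem.Int.floordiv (11 - 5) 3 == (2:Int)) = true from by decide,
            show (PySem.Int.floordiv (12 - 5) 3 == (0:Int)) = false from by decide,
            show (PySem.Int.floordiv (12 - 5) 3 == (1:Int)) = false from by decide,
            show (PySem.Int.floordiv (12 - 5) 3 == (2:Int)) = true from by decide,
            show (PySem.Int.floordiv (13 - 5) 3 == (0:Int)) = false from by decide,
            show (PySem.Int.floordiv (13 - 5) 3 == (1:Int)) = false from by decide,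
            show (PySem.Int.floordiv (13 - 5) 3 == (2:Int)) = true from by decide,
            pv_chunk_box_on, pv_chunk_box_off, List.append_nil, List.nil_append]
      simp only [show PySem.List.pyRange 5 8 1 = [5,6,7] from by decide,
            show PySem.List.pyRange 8 11 1 = [8,9,10] from by decide,
            show PySem.List.pyRange 11 14 1 = [11,12,13] from by decide,
            show PySem.List.pyRange 0 3 1 = [0,1,2] from by decide,
            show PySem.List.pyRange 3 6 1 = [3,4,5] from by decide,
            show PySem.List.pyRange 6 9 1 = [6,7,8] from by decide,
            show ((PySem.List.pyRange 0 9 1).filter (fun c => PySem.Int.floordiv c 3 == 0)) = [0,1,2] from by decide,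
            show ((PySem.List.pyRange 0 9 1).filter (fun c => PySem.Int.floordiv c 3 == 1)) = [3,4,5] from by decide,
            show ((PySem.List.pyRange 0 9 1).filter (fun c => PySem.Int.floordiv c 3 == 2)) = [6,7,8] from by decide,
            List.flatMap_cons, List.flatMap_nil, pv_boxrowA, List.append_nil]
      exact pv_neq _ _

-- ---------- B-side: flattening the two loops into one fold over the cells ----------
lemma pv_foldl_filter_map {σ : Type} (f : σ → (Int × Int × String) → σ)
    (P : Int → Prop) [DecidablePred P] (g : Int → (Int × Int × String)) :
    ∀ (l : List Int) (st : σ),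
    l.foldl (fun st c => if P c then f st (g c) else st) st
      = ((l.filter (fun c => decide (P c))).map g).foldl f st := by
  intro l
  induction l with
  | nil => simp
  | cons c cs ih => intro st; by_cases h : P c <;> simp [h, ih]

lemma pv_outer (grid : List (List String)) :
    ∀ (rs : List Int) (st : Bool × Bool × Bool × PySem.Set (String × Int × String)),
    rs.foldl (fun st r => if r < (grid.length : Int) then
        ((((PySem.List.pyRange 0 9 1).filter (fun c => decide (pvCell grid r c ≠ ""))).map
            (fun c => (r, c, pvCell grid r c))).foldl pvStep st)
      else st) st
    = (rs.flatMap (pvChunk grid)).foldl pvStep st := by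
  intro rs
  induction rs with
  | nil => simp
  | cons r rs ih =>
    intro st
    simp only [List.foldl_cons, List.flatMap_cons]
    by_cases h : r < (grid.length : Int)
    · rw [if_pos h, ih, List.foldl_append]
      congr 1
      unfold pvChunk
      rw [if_pos h]
    · rw [if_neg h, ih]
      have hch : pvChunk grid r = [] := by unfold pvChunk; rw [if_neg h]
      rw [hch, List.nil_append]

def pvTags (t : Int × Int × String) : List (String × Int × String) := [pvTagR t, pvTagC t, pvTagB t]

lemma pv_memR (t u : Int × Int × String) : pvTagR t ∈ pvTags u ↔ pvTagR t = pvTagR u := by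
  simp [pvTags, pvTagR, pvTagC, pvTagB, Prod.ext_iff]

lemma pv_memC (t u : Int × Int × String) : pvTagC t ∈ pvTags u ↔ pvTagC t = pvTagC u := by
  simp [pvTags, pvTagR, pvTagC, pvTagB, Prod.ext_iff]

lemma pv_memB (t u : Int × Int × String) : pvTagB t ∈ pvTags u ↔ pvTagB t = pvTagB u := by
  simp [pvTags, pvTagR, pvTagC, pvTagB, Prod.ext_iff]

lemma pv_nodup_snoc {β : Type} (N : List β) (x : β) : (N ++ [x]).Nodup ↔ N.Nodup ∧ x ∉ N := by
  rw [List.nodup_append]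
  constructor
  · rintro ⟨h1, -, h3⟩
    exact ⟨h1, fun hx => h3 x hx x (List.mem_singleton_self x) rfl⟩
  · rintro ⟨h1, h2⟩
    refine ⟨h1, List.nodup_singleton x, ?_⟩
    intro a ha b hb
    rw [List.mem_singleton] at hb
    subst hb
    exact fun he => h2 (he ▸ ha)

lemma pv_flag_step {tag : (Int × Int × String) → String × Int × String}
    (hdisc : ∀ t u, tag t ∈ pvTags u ↔ tag t = tag u) (L : List (Int × Int × String)) (t : Int × Int × String) :
    (!decide (tag t ∈ PySem.Set.ofList (L.flatMap pvTags)) && decide (L.map tag).Nodup)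
      = decide ((L.map tag ++ [tag t]).Nodup) := by
  have hiff : tag t ∈ PySem.Set.ofList (L.flatMap pvTags) ↔ tag t ∈ L.map tag := by
    rw [PySem.Set.mem_ofList, List.mem_flatMap]
    constructor
    · rintro ⟨u, hu, he⟩
      exact List.mem_map.2 ⟨u, hu, ((hdisc t u).1 he).symm⟩
    · intro h
      rcases List.mem_map.1 h with ⟨u, hu, he⟩
      exact ⟨u, hu, (hdisc t u).2 he.symm⟩
  by_cases hm : tag t ∈ L.map tag
  · have hs : tag t ∈ PySem.Set.ofList (L.flatMap pvTags) := hiff.2 hm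
    simp [hs, pv_nodup_snoc, hm]
  · have hs : tag t ∉ PySem.Set.ofList (L.flatMap pvTags) := fun h => hm (hiff.1 h)
    by_cases hN : (L.map tag).Nodup <;> simp [hs, hN, pv_nodup_snoc, hm]

lemma pv_B_run (L : List (Int × Int × String)) :
    L.foldl pvStep (true, true, true, PySem.Set.empty)
      = (decide (L.map pvTagR).Nodup, decide (L.map pvTagC).Nodup, decide (L.map pvTagB).Nodup,
         PySem.Set.ofList (L.flatMap pvTags)) := by
  induction L using List.reverseRecOn with
  | nil => simp [PySem.Set.empty, PySem.Set.ofList]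
  | append_singleton L t ih =>
    rw [List.foldl_append, ih]
    simp only [List.foldl_cons, List.foldl_nil]
    unfold pvStep
    refine Prod.ext ?_ (Prod.ext ?_ (Prod.ext ?_ ?_))
    · -- rows flag
      rw [List.map_append]
      simpa using pv_flag_step pv_memR L t
    · -- cols flag
      rw [List.map_append]
      simpa using pv_flag_step pv_memC L t
    · -- boxes flag
      rw [List.map_append]
      simpa using pv_flag_step pv_memB L t
    · -- seen set
      rw [List.flatMap_append]
      simp [PySem.Set.ofList_append, pvTags, PySem.Set.update_cons, PySem.Set.update_nil]

lemma pv_alt_eq (grid : List (List String)) :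
    check_sudoku_constraints_alt grid
      = (decide ((pvCells grid).map pvTagR).Nodup,
         decide ((pvCells grid).map pvTagC).Nodup,
         decide ((pvCells grid).map pvTagB).Nodup) := by
  simp only [check_sudoku_constraints_alt]
  rw [show (fun (st : Bool × Bool × Bool × PySem.Set (String × Int × String)) (r : Int) =>
        if r < (grid.length : Int) then
          (PySem.List.pyRange 0 9 1).foldl (fun st c =>
            let v := pvCell grid r c
            if v ≠ "" then pvStep st (r, c, v) else st) st
        else st)
      = (fun st r => if r < (grid.length : Int) then
          ((((PySem.List.pyRange 0 9 1).filter (fun c => decide (pvCell grid r c ≠ ""))).map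
              (fun c => (r, c, pvCell grid r c))).foldl pvStep st)
        else st) from by
    funext st r
    simp only [pv_foldl_filter_map pvStep (fun c => pvCell grid r c ≠ "") (fun c => (r, c, pvCell grid r c))]]
  rw [pv_outer]
  rw [show (PySem.List.pyRange 5 14 1).flatMap (pvChunk grid) = pvCells grid from rfl]
  rw [pv_B_run]

-- ---------- Nodup bookkeeping ----------
lemma pv_ofList_sublist (g : List String) : (PySem.Set.ofList g).Sublist g := by
  induction g using List.reverseRecOn with
  | nil => simp
  | append_singleton g x ih =>
    rw [PySem.Set.ofList_append_singleton, PySem.Set.add_eq_ite]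
    by_cases h : x ∈ PySem.Set.ofList g
    · rw [if_pos h]
      exact ih.trans (List.sublist_append_left g [x])
    · rw [if_neg h]
      exact ih.append (List.Sublist.refl [x])

lemma pv_len_nodup (g : List String) :
    ((PySem.Set.ofList g).length == g.length) = decide g.Nodup := by
  by_cases h : g.Nodup
  · simp [PySem.Set.ofList_eq_self_of_nodup g h, h]
  · have hne : (PySem.Set.ofList g).length ≠ g.length := by
      intro he
      have := (pv_ofList_sublist g).eq_of_length he
      exact h (this ▸ PySem.Set.nodup_ofList g)
    simp [h, hne]

lemma pv_nodup_tag {α β : Type} (s : String) (f : α → β) (L : List α) :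
    (L.map (fun t => ((s, f t) : String × β))).Nodup ↔ (L.map f).Nodup := by
  rw [show (fun t => ((s, f t) : String × β)) = (fun x => ((s, x) : String × β)) ∘ f from rfl,
      ← List.map_map]
  exact List.nodup_map_iff (fun a b h => by simpa using congrArg Prod.snd h)

lemma pv_pair_mem {α γ : Type} [DecidableEq γ] (k : α → Int) (v : α → γ) (L : List α) (t : α) :
    (k t, v t) ∈ L.map (fun u => (k u, v u)) ↔ v t ∈ (L.filter (fun u => k u == k t)).map v := by
  simp only [List.mem_map, List.mem_filter, Prod.mk.injEq, beq_iff_eq]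
  constructor
  · rintro ⟨u, hu, hk, hv⟩; exact ⟨u, ⟨hu, hk⟩, hv⟩
  · rintro ⟨u, ⟨hu, hk⟩, hv⟩; exact ⟨u, hu, hk, hv⟩

lemma pv_nodup_partition {α γ : Type} [DecidableEq γ] (k : α → Int) (v : α → γ) :
    ∀ L : List α,
    (L.map (fun t => (k t, v t))).Nodup ↔ ∀ r : Int, ((L.filter (fun t => k t == r)).map v).Nodup := by
  intro L
  induction L with
  | nil => simp
  | cons t L ih =>
    simp only [List.map_cons, List.nodup_cons, ih]
    constructor
    · rintro ⟨hnm, hall⟩ r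
      by_cases hr : k t = r
      · subst hr
        rw [List.filter_cons_of_pos (by simp)]
        simp only [List.map_cons, List.nodup_cons]
        exact ⟨fun hm => hnm ((pv_pair_mem k v L t).2 hm), hall _⟩
      · rw [List.filter_cons_of_neg (by simp [hr])]
        exact hall r
    · intro h
      refine ⟨fun hm => ?_, fun r => ?_⟩
      · have h2 := h (k t)
        rw [List.filter_cons_of_pos (by simp)] at h2
        simp only [List.map_cons, List.nodup_cons] at h2
        exact h2.1 ((pv_pair_mem k v L t).1 hm)
      · have h2 := h r
        by_cases hr : k t = r
        · subst hr
          rw [List.filter_cons_of_pos (by simp)] at h2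
          simp only [List.map_cons, List.nodup_cons] at h2
          exact h2.2
        · rwa [List.filter_cons_of_neg (by simp [hr])] at h2

lemma pv_cells_bounds (grid : List (List String)) :
    ∀ t ∈ pvCells grid, (5 ≤ t.1 ∧ t.1 ≤ 13) ∧ 0 ≤ t.2.1 ∧ t.2.1 ≤ 8 := by
  intro t ht
  simp only [pvCells, List.mem_flatMap] at ht
  obtain ⟨r, hr, ht⟩ := ht
  rw [PySem.List.mem_pyRange_one] at hr
  unfold pvChunk at ht
  split at ht
  · simp only [List.mem_map, List.mem_filter] at ht
    obtain ⟨c, ⟨hc, _⟩, rfl⟩ := ht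
    rw [PySem.List.mem_pyRange_one] at hc
    dsimp only
    exact ⟨⟨by omega, by omega⟩, by omega, by omega⟩
  · simp at ht

lemma pv_fd_bounds (grid : List (List String)) :
    ∀ t ∈ pvCells grid,
      (0 ≤ PySem.Int.floordiv (t.1 - 5) 3 ∧ PySem.Int.floordiv (t.1 - 5) 3 ≤ 2) ∧
      (0 ≤ PySem.Int.floordiv t.2.1 3 ∧ PySem.Int.floordiv t.2.1 3 ≤ 2) := by
  intro t ht
  obtain ⟨⟨h1, h2⟩, h3, h4⟩ := pv_cells_bounds grid t ht
  rw [PySem.Int.floordiv_eq_ediv_of_pos (by norm_num), PySem.Int.floordiv_eq_ediv_of_pos (by norm_num)]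
  omega

lemma pv_forall_range (rs : List Int) (Q : Int → Prop)
    (hout : ∀ r : Int, r ∉ rs → Q r) : (∀ r ∈ rs, Q r) ↔ (∀ r : Int, Q r) := by
  constructor
  · intro h r
    by_cases hr : r ∈ rs
    · exact h r hr
    · exact hout r hr
  · intro h r _
    exact h r

lemma pv_all_decide (rs : List Int) (Q : Int → Prop) [DecidablePred Q] :
    (rs.all (fun r => decide (Q r)) = true) ↔ ∀ r ∈ rs, Q r := by
  simp

-- ---------- pvMid = alt, componentwise ----------
lemma pv_rows_component (grid : List (List String)) :
    (PySem.List.pyRange 5 14 1).all (fun r => pvNoDup (pvGroup grid (fun t => t.1 == r)))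
      = decide ((pvCells grid).map pvTagR).Nodup := by
  rw [Bool.eq_iff_iff]
  simp only [pvNoDup, pvGroup, pv_len_nodup]
  rw [pv_all_decide]
  rw [pv_forall_range _ _ (fun r hr => by
    have : (pvCells grid).filter (fun t => t.1 == r) = [] := by
      rw [List.filter_eq_nil_iff]
      intro t ht
      have hb := (pv_cells_bounds grid t ht).1
      rw [PySem.List.mem_pyRange_one] at hr
      simp only [beq_iff_eq]
      omega
    rw [this]; simp)]
  rw [decide_eq_true_eq]
  rw [show pvTagR = (fun t : Int × Int × String => (("row" : String), t.1, t.2.2)) from rfl]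
  rw [pv_nodup_tag "row" (fun t : Int × Int × String => (t.1, t.2.2))]
  rw [pv_nodup_partition (fun t : Int × Int × String => t.1) (fun t => t.2.2) (pvCells grid)]

lemma pv_cols_component (grid : List (List String)) :
    (PySem.List.pyRange 0 9 1).all (fun c => pvNoDup (pvGroup grid (fun t => t.2.1 == c)))
      = decide ((pvCells grid).map pvTagC).Nodup := by
  rw [Bool.eq_iff_iff]
  simp only [pvNoDup, pvGroup, pv_len_nodup]
  rw [pv_all_decide]
  rw [pv_forall_range _ _ (fun c hc => by
    have : (pvCells grid).filter (fun t => t.2.1 == c) = [] := by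
      rw [List.filter_eq_nil_iff]
      intro t ht
      have hb := (pv_cells_bounds grid t ht).2
      rw [PySem.List.mem_pyRange_one] at hc
      simp only [beq_iff_eq]
      omega
    rw [this]; simp)]
  rw [decide_eq_true_eq]
  rw [show pvTagC = (fun t : Int × Int × String => (("col" : String), t.2.1, t.2.2)) from rfl]
  rw [pv_nodup_tag "col" (fun t : Int × Int × String => (t.2.1, t.2.2))]
  rw [pv_nodup_partition (fun t : Int × Int × String => t.2.1) (fun t => t.2.2) (pvCells grid)]

lemma pv_key_split (a b br bc : Int) (_ha : 0 ≤ a ∧ a ≤ 2) (hb : 0 ≤ b ∧ b ≤ 2)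
    (_hbr : 0 ≤ br ∧ br ≤ 2) (hbc : 0 ≤ bc ∧ bc ≤ 2) :
    ((a == br) && (b == bc)) = (3 * a + b == 3 * br + bc) := by
  rw [Bool.eq_iff_iff]
  simp only [Bool.and_eq_true, beq_iff_eq]
  omega

lemma pv_boxes_component (grid : List (List String)) :
    (PySem.List.pyRange 0 3 1).all (fun br => (PySem.List.pyRange 0 3 1).all (fun bc =>
       pvNoDup (pvGroup grid (fun t =>
         PySem.Int.floordiv (t.1 - 5) 3 == br && PySem.Int.floordiv t.2.1 3 == bc))))
      = decide ((pvCells grid).map pvTagB).Nodup := by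
  rw [Bool.eq_iff_iff]
  simp only [pvNoDup, pvGroup, pv_len_nodup]
  rw [decide_eq_true_eq]
  rw [show pvTagB = (fun t : Int × Int × String =>
        (("box" : String), 3 * PySem.Int.floordiv (t.1 - 5) 3 + PySem.Int.floordiv t.2.1 3, t.2.2)) from rfl]
  rw [pv_nodup_tag "box"
      (fun t : Int × Int × String => (3 * PySem.Int.floordiv (t.1 - 5) 3 + PySem.Int.floordiv t.2.1 3, t.2.2))]
  rw [pv_nodup_partition
      (fun t : Int × Int × String => 3 * PySem.Int.floordiv (t.1 - 5) 3 + PySem.Int.floordiv t.2.1 3)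
      (fun t => t.2.2) (pvCells grid)]
  simp only [List.all_eq_true, decide_eq_true_eq]
  constructor
  · -- pairs → ∀ k
    intro h k
    by_cases hk : 0 ≤ k ∧ k < 9
    · have hbr : 0 ≤ k / 3 ∧ k / 3 ≤ 2 := by omega
      have hbc : 0 ≤ k % 3 ∧ k % 3 ≤ 2 := by omega
      have hmem1 : (k / 3) ∈ PySem.List.pyRange 0 3 1 := by
        rw [PySem.List.mem_pyRange_one]; omega
      have hmem2 : (k % 3) ∈ PySem.List.pyRange 0 3 1 := by
        rw [PySem.List.mem_pyRange_one]; omega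
      have hgrp := h (k / 3) hmem1 (k % 3) hmem2
      have hkk : (3 : Int) * (k / 3) + k % 3 = k := by omega
      rwa [List.filter_congr (fun t ht => by
        rw [pv_key_split _ _ _ _ (pv_fd_bounds grid t ht).1 (pv_fd_bounds grid t ht).2 hbr hbc, hkk])] at hgrp
    · have : (pvCells grid).filter (fun t =>
          3 * PySem.Int.floordiv (t.1 - 5) 3 + PySem.Int.floordiv t.2.1 3 == k) = [] := by
        rw [List.filter_eq_nil_iff]
        intro t ht
        have hb1 := (pv_fd_bounds grid t ht).1
        have hb2 := (pv_fd_bounds grid t ht).2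
        simp only [beq_iff_eq]
        omega
      rw [this]
      simp
  · -- ∀ k → pairs
    intro h br hbr bc hbc
    rw [PySem.List.mem_pyRange_one] at hbr hbc
    have hgrp := h (3 * br + bc)
    rwa [List.filter_congr (fun t ht =>
      (pv_key_split _ _ _ _ (pv_fd_bounds grid t ht).1 (pv_fd_bounds grid t ht).2
        ⟨by omega, by omega⟩ ⟨by omega, by omega⟩).symm)] at hgrp

lemma pv_mid_eq_alt (grid : List (List String)) : pvMid grid = check_sudoku_constraints_alt grid := by
  rw [pv_alt_eq, pvMid]
  exact congrArg₂ Prod.mk (pv_rows_component grid)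
    (congrArg₂ Prod.mk (pv_cols_component grid) (pv_boxes_component grid))

-- ===== VERDICT (by name: the statement is the Claim_ definition above) =====

theorem check_sudoku_constraints_spec : Claim_equal_check_sudoku_constraints := by
  intro grid _ _
  unfold Spec_check_sudoku_constraints
  rw [pv_A_eq_mid, pv_mid_eq_alt]
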